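-- pv_equiv track=rewrite | github.com/chrisryanhart/18.2_Python_Data_structures_Exercises | 39_find_greater_numbers/find_greater_numbers.py | find_greater_numbers
-- ===== SOURCE A (Python) =====
-- def find_greater_numbers(nums):
--     """Return # of times a number is followed by a greater number.
--
--     For example, for [1, 2, 3], the answer is 3:
--     - the 1 is followed by the 2 *and* the 3
--     - the 2 is followed by the 3
--
--     Examples:
--
--         >>> find_greater_numbers([1, 2, 3])
--         3
--
--         >>> find_greater_numbers([6, 1, 2, 7])
--         4
--
--         >>> find_greater_numbers([5, 4, 3, 2, 1])
--         0
--
--         >>> find_greater_numbers([])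
--         0
--     """
--
--     # loop through elements
--     # are the subsequent elements larger?
--     # make copy of list
--     # iterate through one list
--
--     # or start by getting length
--     # make list with range of
--     #
--     # can also find index
--
--     length = len(nums)
--     counter = 1
--     greater = 0
--
--     for num in nums:
--         for ele in range(length):
--             if ele >= counter and num < nums[ele]:
--                 greater += 1
--         counter += 1
--     return greater
-- ===== SOURCE B (Python) =====
-- def find_greater_numbers(nums):
--     """Return # of times a number is followed by a greater number.
--
--     Merge-sort based counting: O(n log n) instead of the quadratic
--     double scan.  sort_count returns (sorted copy, # of ordered pairs
--     (i, j) with i < j and a[i] < a[j]) for its argument.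
--     """
--     def sort_count(a):
--         n = len(a)
--         if n < 2:
--             return a, 0
--         mid = n // 2
--         left, cl = sort_count(a[:mid])
--         right, cr = sort_count(a[mid:])
--         merged = []
--         cross = 0
--         i = 0
--         j = 0
--         while i < len(left) and j < len(right):
--             if left[i] < right[j]:
--                 # left[i] is smaller than every remaining right element
--                 cross += len(right) - j
--                 merged.append(left[i])
--                 i += 1
--             else:
--                 merged.append(right[j])
--                 j += 1
--         merged.extend(left[i:])
--         merged.extend(right[j:])
--         return merged, cl + cr + cross
--     return sort_count(nums)[1]
-- ===== Notes on version B (the rewrite author's own statement) =====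
-- stated objective: faster
-- what changed: Replaces A's quadratic double scan (for each element, rescan the whole list by index) with a merge-sort-style divide and conquer that counts the cross pairs while merging the two sorted halves.
import Mathlib
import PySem

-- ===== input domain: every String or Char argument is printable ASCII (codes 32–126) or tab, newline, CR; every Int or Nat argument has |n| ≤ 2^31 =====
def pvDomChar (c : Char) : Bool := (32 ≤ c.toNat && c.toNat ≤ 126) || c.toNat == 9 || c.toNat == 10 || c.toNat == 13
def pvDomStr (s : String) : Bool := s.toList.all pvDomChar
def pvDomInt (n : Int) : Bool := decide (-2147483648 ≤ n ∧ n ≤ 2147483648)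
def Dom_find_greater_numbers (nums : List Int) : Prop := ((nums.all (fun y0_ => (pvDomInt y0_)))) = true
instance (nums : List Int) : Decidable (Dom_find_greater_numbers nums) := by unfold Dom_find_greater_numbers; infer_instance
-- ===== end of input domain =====

-- B replaces A's quadratic double scan by merge-sort-style counting of ascending pairs (O(n log n)).

-- ===== PORT A =====
-- literal port of A: counter/greater accumulators, inner loop over range(len(nums)) indexing nums
def find_greater_numbers (nums : List Int) : Int :=
  let length : Int := (nums.length : Int)
  let st := nums.foldl
    (fun (st : Int × Int) num =>
      let greater := (PySem.List.pyRange 0 length 1).foldl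
        (fun g ele => if st.1 ≤ ele ∧ num < PySem.List.pyGetD nums ele 0 then g + 1 else g)
        st.2
      (st.1 + 1, greater))
    ((1 : Int), (0 : Int))
  st.2

-- ===== PORT B =====
-- port of Source B's while-merge loop: recursion on the two front elements, counting cross pairs
def mergeCount : List Int → List Int → List Int × Int
  | [], r => (r, 0)
  | x :: xs, [] => (x :: xs, 0)
  | x :: xs, y :: ys =>
    if x < y then
      let p := mergeCount xs (y :: ys)
      (x :: p.1, ((y :: ys).length : Int) + p.2)
    else
      let p := mergeCount (x :: xs) ys
      (y :: p.1, p.2)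

-- port of Source B's sort_count: split at the midpoint, recurse, merge and add the counts
def sortCount (a : List Int) : List Int × Int :=
  if a.length < 2 then (a, 0)
  else
    let mid := a.length / 2
    let pl := sortCount (a.take mid)
    let pr := sortCount (a.drop mid)
    let pm := mergeCount pl.1 pr.1
    (pm.1, pl.2 + pr.2 + pm.2)
termination_by a.length
decreasing_by
  · simp only [List.length_take]; omega
  · simp only [List.length_drop]; omega

def find_greater_numbers_alt (nums : List Int) : Int := (sortCount nums).2

-- ===== PRECONDITION & SPEC =====
def Spec_find_greater_numbers (nums : List Int) (out : Int) : Prop := out = find_greater_numbers_alt nums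
instance (nums : List Int) (out : Int) : Decidable (Spec_find_greater_numbers nums out) := by unfold Spec_find_greater_numbers; infer_instance

-- ===== CLAIM (what is proved, stated in full; the proofs are below) =====
def Claim_equal_find_greater_numbers : Prop := ∀ (nums : List Int), Dom_find_greater_numbers nums → Spec_find_greater_numbers nums (find_greater_numbers nums)

-- ===== LEMMAS AND PROOFS =====

-- number of cross pairs (x from l, y from r, x < y)
def cross (l r : List Int) : Int :=
  (l.map (fun x => ((r.countP (fun y => decide (x < y)) : Nat) : Int))).sum

-- number of ascending pairs i < j with a[i] < a[j]
def asc : List Int → Int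
  | [] => 0
  | x :: xs => ((xs.countP (fun y => decide (x < y)) : Nat) : Int) + asc xs

theorem cross_nil_right (l : List Int) : cross l [] = 0 := by
  simp [cross]

theorem cross_cons_left (x : Int) (xs r : List Int) :
    cross (x :: xs) r = ((r.countP (fun y => decide (x < y)) : Nat) : Int) + cross xs r := by
  simp [cross]

theorem cross_cons_right (l : List Int) (y : Int) (ys : List Int) :
    cross l (y :: ys) = ((l.countP (fun x => decide (x < y)) : Nat) : Int) + cross l ys := by
  induction l with
  | nil => simp [cross]
  | cons a t ih =>
    simp only [cross_cons_left, ih, List.countP_cons]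
    by_cases h : a < y <;> simp [h] <;> omega

theorem asc_append (l r : List Int) : asc (l ++ r) = asc l + cross l r + asc r := by
  induction l with
  | nil => simp [asc, cross]
  | cons x xs ih =>
    simp only [List.cons_append, asc, ih, List.countP_append, cross_cons_left]
    push_cast; ring

theorem cross_perm_left {l l' : List Int} (h : l.Perm l') (r : List Int) :
    cross l r = cross l' r := by
  unfold cross
  exact List.Perm.sum_eq (h.map _)

theorem cross_perm_right (l : List Int) {r r' : List Int} (h : r.Perm r') :
    cross l r = cross l r' := by
  unfold cross
  congr 1
  refine List.map_congr_left (fun x _ => ?_)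
  rw [h.countP_eq]

theorem mergeCount_perm (l r : List Int) : (mergeCount l r).1.Perm (l ++ r) := by
  induction l, r using mergeCount.induct with
  | case1 r => simp [mergeCount]
  | case2 x xs => simp [mergeCount]
  | case3 x xs y ys h ih =>
    simp only [mergeCount, if_pos h]
    exact (ih.cons x)
  | case4 x xs y ys h ih =>
    simp only [mergeCount, if_neg h]
    exact (ih.cons y).trans List.perm_middle.symm

theorem mergeCount_sorted {l r : List Int}
    (hl : l.Pairwise (· ≤ ·)) (hr : r.Pairwise (· ≤ ·)) :
    (mergeCount l r).1.Pairwise (· ≤ ·) := by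
  induction l, r using mergeCount.induct with
  | case1 r => simpa [mergeCount] using hr
  | case2 x xs => simpa [mergeCount] using hl
  | case3 x xs y ys h ih =>
    simp only [mergeCount, if_pos h]
    rw [List.pairwise_cons]
    refine ⟨fun z hz => ?_, ih (List.Pairwise.of_cons hl) hr⟩
    have hz' : z ∈ xs ++ y :: ys := (mergeCount_perm xs (y :: ys)).mem_iff.mp hz
    rcases List.mem_append.mp hz' with hz1 | hz2
    · exact (List.pairwise_cons.mp hl).1 z hz1
    · rcases List.mem_cons.mp hz2 with rfl | hz3
      · exact le_of_lt h
      · exact le_of_lt (lt_of_lt_of_le h ((List.pairwise_cons.mp hr).1 z hz3))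
  | case4 x xs y ys h ih =>
    simp only [mergeCount, if_neg h]
    rw [List.pairwise_cons]
    refine ⟨fun z hz => ?_, ih hl (List.Pairwise.of_cons hr)⟩
    have hz' : z ∈ (x :: xs) ++ ys := (mergeCount_perm (x :: xs) ys).mem_iff.mp hz
    have hyx : y ≤ x := le_of_not_gt h
    rcases List.mem_append.mp hz' with hz1 | hz2
    · rcases List.mem_cons.mp hz1 with rfl | hz3
      · exact hyx
      · exact hyx.trans ((List.pairwise_cons.mp hl).1 z hz3)
    · exact (List.pairwise_cons.mp hr).1 z hz2

theorem mergeCount_count {l r : List Int}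
    (hl : l.Pairwise (· ≤ ·)) (hr : r.Pairwise (· ≤ ·)) :
    (mergeCount l r).2 = cross l r := by
  induction l, r using mergeCount.induct with
  | case1 r => simp [mergeCount, cross]
  | case2 x xs => simp [mergeCount, cross_nil_right]
  | case3 x xs y ys h ih =>
    simp only [mergeCount, if_pos h]
    rw [ih (List.Pairwise.of_cons hl) hr, cross_cons_left]
    have hcount : (y :: ys).countP (fun y' => decide (x < y')) = (y :: ys).length := by
      refine List.countP_eq_length.mpr (fun z hz => ?_)
      rcases List.mem_cons.mp hz with rfl | hz2
      · simpa using h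
      · simpa using lt_of_lt_of_le h ((List.pairwise_cons.mp hr).1 z hz2)
    rw [hcount]
  | case4 x xs y ys h ih =>
    simp only [mergeCount, if_neg h]
    rw [ih hl (List.Pairwise.of_cons hr), cross_cons_right]
    have hyx : y ≤ x := le_of_not_gt h
    have hcount : (x :: xs).countP (fun x' => decide (x' < y)) = 0 := by
      refine List.countP_eq_zero.mpr (fun z hz => ?_)
      rcases List.mem_cons.mp hz with rfl | hz2
      · simpa using h
      · simpa using not_lt_of_ge (hyx.trans ((List.pairwise_cons.mp hl).1 z hz2))
    rw [hcount]
    simp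

theorem sortCount_eq (a : List Int) (h : ¬ a.length < 2) :
    sortCount a = ((mergeCount (sortCount (a.take (a.length / 2))).1
                               (sortCount (a.drop (a.length / 2))).1).1,
      (sortCount (a.take (a.length / 2))).2 + (sortCount (a.drop (a.length / 2))).2
        + (mergeCount (sortCount (a.take (a.length / 2))).1
                      (sortCount (a.drop (a.length / 2))).1).2) := by
  rw [sortCount, if_neg h]

theorem sortCount_spec (a : List Int) :
    (sortCount a).1.Perm a ∧ (sortCount a).1.Pairwise (· ≤ ·) ∧ (sortCount a).2 = asc a := by
  induction a using sortCount.induct with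
  | case1 a h =>
    rw [sortCount, if_pos h]
    match a, h with
    | [], _ => exact ⟨List.Perm.refl _, by simp, by simp [asc]⟩
    | [x], _ => exact ⟨List.Perm.refl _, by simp, by simp [asc]⟩
  | case2 a h mid ihl ihr =>
    rw [sortCount_eq a h]
    obtain ⟨pl1, pl2, pl3⟩ := ihl
    obtain ⟨pr1, pr2, pr3⟩ := ihr
    refine ⟨?_, mergeCount_sorted pl2 pr2, ?_⟩
    · exact ((mergeCount_perm _ _).trans (pl1.append pr1)).trans
        (by rw [List.take_append_drop])
    · rw [mergeCount_count pl2 pr2, pl3, pr3,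
        cross_perm_left pl1 _, cross_perm_right _ pr1]
      conv_rhs => rw [show a = a.take (a.length / 2) ++ a.drop (a.length / 2) from
        (List.take_append_drop _ _).symm]
      rw [asc_append]
      ring

-- the inner loop of A counts, among indices ≥ c, those whose entry exceeds num
theorem innerLoop_eq (nums : List Int) (num : Int) (c : Nat) (g : Int) (hc : c ≤ nums.length) :
    (PySem.List.pyRange 0 (nums.length : Int) 1).foldl
      (fun g ele => if ((c : Int)) ≤ ele ∧ num < PySem.List.pyGetD nums ele 0 then g + 1 else g) g
    = g + (((nums.drop c).countP (fun y => decide (num < y)) : Nat) : Int) := by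
  rw [PySem.List.pyRange_one_append 0 (c : Int) (nums.length : Int)
    (by exact_mod_cast Nat.zero_le c) (by exact_mod_cast hc)]
  rw [List.foldl_append]
  have h1 : ∀ (acc x : Int), x ∈ PySem.List.pyRange 0 (c : Int) 1 →
      (fun (g ele : Int) => if ((c : Int)) ≤ ele ∧ num < PySem.List.pyGetD nums ele 0
        then g + 1 else g) acc x = (fun (acc : Int) (_ : Int) => acc) acc x := by
    intro acc x hx
    have hx' := (PySem.List.mem_pyRange_one.mp hx).2
    simp only []
    rw [if_neg]
    rintro ⟨h1', _⟩
    omega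
  rw [PySem.List.foldl_congr_mem (PySem.List.pyRange 0 (c : Int))
      (fun (g ele : Int) => if ((c : Int)) ≤ ele ∧ num < PySem.List.pyGetD nums ele 0
        then g + 1 else g) (fun (acc : Int) (_ : Int) => acc) g h1,
    PySem.List.foldl_ignore]
  have h2 : ∀ (acc x : Int), x ∈ PySem.List.pyRange (c : Int) (nums.length : Int) 1 →
      (fun (g ele : Int) => if ((c : Int)) ≤ ele ∧ num < PySem.List.pyGetD nums ele 0
        then g + 1 else g) acc x
      = (fun (acc j : Int) => if num < PySem.List.pyGetD nums j 0 then acc + 1 else acc)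
          acc x := by
    intro acc x hx
    have hx' := (PySem.List.mem_pyRange_one.mp hx).1
    simp [hx']
  rw [PySem.List.foldl_congr_mem (PySem.List.pyRange (c : Int) (nums.length : Int))
      (fun (g ele : Int) => if ((c : Int)) ≤ ele ∧ num < PySem.List.pyGetD nums ele 0
        then g + 1 else g)
      (fun (acc j : Int) => if num < PySem.List.pyGetD nums j 0 then acc + 1 else acc) g h2]
  have h3 : (PySem.List.pyRange (c : Int) (nums.length : Int) 1).foldl
      (fun (acc j : Int) => if num < PySem.List.pyGetD nums j 0 then acc + 1 else acc) g
      = (nums.drop ((c : Int)).toNat).foldl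
          (fun (acc y : Int) => if num < y then acc + 1 else acc) g :=
    PySem.List.foldl_pyRange_pyGetD' nums 0
      (fun (acc y : Int) => if num < y then acc + 1 else acc) g (a := (c : Int))
      (by exact_mod_cast Nat.zero_le c)
  rw [h3, Int.toNat_natCast]
  have h4 : (nums.drop c).foldl
      (fun (acc y : Int) => if num < y then acc + 1 else acc) g
      = g + (((nums.drop c).countP (fun y => decide (num < y)) : Nat) : Int) :=
    PySem.List.foldl_ite_add_one _ _ _
  exact h4

theorem outerLoop_eq (nums : List Int) : ∀ (s : List Int) (j : Nat) (g : Int),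
    nums.drop j = s →
    ((s.foldl
      (fun (st : Int × Int) num =>
        let greater := (PySem.List.pyRange 0 (nums.length : Int) 1).foldl
          (fun g ele => if st.1 ≤ ele ∧ num < PySem.List.pyGetD nums ele 0 then g + 1 else g)
          st.2
        (st.1 + 1, greater))
      (((j : Int) + 1), g)).2) = g + asc s := by
  intro s
  induction s with
  | nil => intro j g h; simp [asc]
  | cons num t ih =>
    intro j g h
    have hlen : j < nums.length := by
      have := congrArg List.length h
      simp [List.length_drop] at this
      omega
    have hdrop : nums.drop (j + 1) = t := by
      have := congrArg List.tail h
      rwa [List.tail_drop] at this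
    simp only [List.foldl_cons]
    have hcast : ((j : Int) + 1) = (((j + 1 : Nat) : Int)) := by push_cast; ring
    rw [hcast, innerLoop_eq nums num (j + 1) g (by omega), hdrop,
      ih (j + 1) _ hdrop]
    simp [asc]
    ring

theorem A_eq_asc (nums : List Int) : find_greater_numbers nums = asc nums := by
  have h := outerLoop_eq nums nums 0 0 (by simp)
  simp only [Nat.cast_zero, zero_add] at h
  simpa [find_greater_numbers] using h

-- ===== VERDICT (by name: the statement is the Claim_ definition above) =====
theorem find_greater_numbers_spec : Claim_equal_find_greater_numbers := by
  intro nums _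
  unfold Spec_find_greater_numbers find_greater_numbers_alt
  rw [A_eq_asc, (sortCount_spec nums).2.2]
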